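-- pv_equiv track=rewrite | github.com/alexeycoder/gb-python-intro-homework-2 | task05.py | generate_alphabet_list
-- ===== SOURCE A (Python) =====
-- def generate_alphabet_list(list_length):
--     resulted_lst = []
--
--     idx_la = ord('a')  # 97
--     idx_lz = ord('z')  # 122
--     idx_ua = ord('A')  # 65
--     idx_uz = ord('Z')  # 90
--     cur_char_idx = idx_la
--     i = 0
--     while i < list_length:
--         i += 1
--         resulted_lst.append(chr(cur_char_idx))
--         if cur_char_idx == idx_lz:
--             cur_char_idx = idx_ua
--         elif cur_char_idx == idx_uz:
--             cur_char_idx = idx_la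
--         else:
--             cur_char_idx += 1
--     return resulted_lst
-- ===== SOURCE B (Python) =====
-- def generate_alphabet_list(list_length):
--     alphabet = "abcdefghijklmnopqrstuvwxyzABCDEFGHIJKLMNOPQRSTUVWXYZ"
--     result = []
--     i = 0
--     while i < list_length:
--         result.append(alphabet[i % 52])
--         i += 1
--     return result
-- ===== Notes on version B (the rewrite author's own statement) =====
-- stated objective: simpler
-- what changed: Replaces the stateful three-way boundary-resetting character counter with a fixed 52-character lookup table indexed by position modulo 52.
import Mathlib
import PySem

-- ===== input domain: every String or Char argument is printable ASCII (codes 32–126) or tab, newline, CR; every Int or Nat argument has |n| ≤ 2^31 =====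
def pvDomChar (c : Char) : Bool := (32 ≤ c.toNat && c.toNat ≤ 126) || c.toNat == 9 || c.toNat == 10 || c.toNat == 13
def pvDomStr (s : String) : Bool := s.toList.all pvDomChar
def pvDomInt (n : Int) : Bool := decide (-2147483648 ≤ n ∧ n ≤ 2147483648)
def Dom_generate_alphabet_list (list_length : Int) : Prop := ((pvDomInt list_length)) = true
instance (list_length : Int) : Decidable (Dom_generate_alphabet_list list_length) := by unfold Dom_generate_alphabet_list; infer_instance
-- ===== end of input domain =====

-- B replaces A's stateful three-way wrap-around character counter with a fixed 52-char lookup table indexed by i % 52 (objective: simpler).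


-- ===== PORT A =====
-- while i < list_length: append chr(cur_char_idx); step cur_char_idx through a..z then A..Z (wrap at 'z'->'A', 'Z'->'a')
def pvLoopA (list_length : Int) (i : Int) (cur : Nat) (acc : List String) : List String :=
  if i < list_length then
    pvLoopA list_length (i + 1)
      (if cur = 122 then 65 else if cur = 90 then 97 else cur + 1)
      (acc ++ [String.ofList [Char.ofNat cur]])
  else acc
termination_by (list_length - i).toNat
decreasing_by omega

def generate_alphabet_list (list_length : Int) : List String :=
  pvLoopA list_length 0 97 []  -- cur_char_idx starts at ord('a') = 97

-- ===== PORT B =====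
-- the 52-char cycle, as in Source B's string literal
def pvAlphabet : List Char :=
  "abcdefghijklmnopqrstuvwxyzABCDEFGHIJKLMNOPQRSTUVWXYZ".toList

def pvLoopB (list_length : Int) (i : Int) (acc : List String) : List String :=
  if i < list_length then
    pvLoopB list_length (i + 1)
      (acc ++ [String.ofList ((PySem.List.pyGet? pvAlphabet (PySem.Int.mod i 52)).toList)])
  else acc
termination_by (list_length - i).toNat
decreasing_by omega

def generate_alphabet_list_alt (list_length : Int) : List String :=
  pvLoopB list_length 0 []

-- ===== PRECONDITION & SPEC =====
def Spec_generate_alphabet_list (list_length : Int) (out : List String) : Prop := out = generate_alphabet_list_alt list_length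
instance (list_length : Int) (out : List String) : Decidable (Spec_generate_alphabet_list list_length out) := by unfold Spec_generate_alphabet_list; infer_instance

-- ===== CLAIM (what is proved, stated in full; the proofs are below) =====
def Claim_equal_generate_alphabet_list : Prop := ∀ (list_length : Int), Dom_generate_alphabet_list list_length → Spec_generate_alphabet_list list_length (generate_alphabet_list list_length)

-- ===== LEMMAS AND PROOFS =====
-- the code A's counter holds after k completed iterations
def pvCodeAt (k : Nat) : Nat :=
  if k % 52 < 26 then 97 + k % 52 else 65 + (k % 52 - 26)

lemma pvCodeAt_step (k : Nat) :
    (if pvCodeAt k = 122 then 65 else if pvCodeAt k = 90 then 97 else pvCodeAt k + 1)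
      = pvCodeAt (k + 1) := by
  unfold pvCodeAt
  have h1 : k % 52 < 52 := Nat.mod_lt _ (by omega)
  have h2 : (k + 1) % 52 = if k % 52 = 51 then 0 else k % 52 + 1 := by
    split_ifs with h <;> omega
  split_ifs <;> omega

lemma pvAlphabet_at (r : Fin 52) :
    (PySem.List.pyGet? pvAlphabet ((r : Nat) : Int)).toList
      = [Char.ofNat (pvCodeAt r)] := by
  fin_cases r <;> decide

lemma pvB_char (k : Nat) :
    String.ofList ((PySem.List.pyGet? pvAlphabet (PySem.Int.mod ((k : Nat) : Int) 52)).toList)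
      = String.ofList [Char.ofNat (pvCodeAt k)] := by
  have hm : PySem.Int.mod ((k : Nat) : Int) 52 = ((k % 52 : Nat) : Int) :=
    PySem.Int.mod_natCast k 52
  rw [hm, pvAlphabet_at ⟨k % 52, Nat.mod_lt _ (by omega)⟩]
  congr 1
  unfold pvCodeAt
  have h : k % 52 % 52 = k % 52 := by omega
  rw [h]

lemma pvLoop_eq (fuel : Nat) : ∀ (n : Int) (k : Nat) (acc : List String),
    (n - (k : Int)).toNat = fuel →
    pvLoopA n (k : Int) (pvCodeAt k) acc = pvLoopB n (k : Int) acc := by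
  induction fuel with
  | zero =>
    intro n k acc h
    rw [pvLoopA, pvLoopB]
    have : ¬ ((k : Int) < n) := by omega
    simp [this]
  | succ m ih =>
    intro n k acc h
    rw [pvLoopA, pvLoopB]
    by_cases hlt : (k : Int) < n
    · simp only [hlt, if_true]
      rw [pvB_char k, pvCodeAt_step k]
      have hk1 : (k : Int) + 1 = ((k + 1 : Nat) : Int) := by push_cast; ring
      rw [hk1]
      exact ih n (k + 1) _ (by omega)
    · simp [hlt]


-- ===== VERDICT (by name: the statement is the Claim_ definition above) =====
theorem generate_alphabet_list_spec : Claim_equal_generate_alphabet_list := by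
  intro n _
  unfold Spec_generate_alphabet_list generate_alphabet_list generate_alphabet_list_alt
  exact pvLoop_eq (n - 0).toNat n 0 [] rfl
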